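-- pv_equiv track=rewrite | github.com/contour-terminal/contour | test/demo_math_symbols.py | left_square
-- ===== SOURCE A (Python) =====
-- LEFT_SQ_UPPER  = "\u23A1"           # ⎡
--
-- LEFT_SQ_EXT    = "\u23A2"           # ⎢
--
-- LEFT_SQ_LOWER  = "\u23A3"           # ⎣
--
-- def left_square(height: int) -> list[str]:
--     """Build a left square bracket of given height."""
--     height = max(2, height)
--     lines = []
--     for i in range(height):
--         if i == 0:
--             lines.append(LEFT_SQ_UPPER)
--         elif i == height - 1:
--             lines.append(LEFT_SQ_LOWER)
--         else:
--             lines.append(LEFT_SQ_EXT)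
--     return lines
-- ===== SOURCE B (Python) =====
-- LEFT_SQ_UPPER  = "\u23A1"           # ⎡
-- LEFT_SQ_EXT    = "\u23A2"           # ⎢
-- LEFT_SQ_LOWER  = "\u23A3"           # ⎣
--
-- def left_square(height: int) -> list[str]:
--     """Build a left square bracket of given height."""
--     # Build the bracket bottom-up in reverse: start from the bottom corner,
--     # grow extension lines until one slot remains, cap with the top corner,
--     # then reverse.  No indexing, no max(), no per-position classification.
--     rev = [LEFT_SQ_LOWER]
--     while len(rev) + 1 < height:
--         rev.append(LEFT_SQ_EXT)
--     rev.append(LEFT_SQ_UPPER)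
--     return rev[::-1]
-- ===== Notes on version B (the rewrite author's own statement) =====
-- stated objective: alternative
-- what changed: Replaced the index loop that classifies each position (first/last/middle) with a bottom-up construction: build the reversed bracket by growing from the bottom corner under a length-driven while loop, cap with the top corner, and reverse; no indexing, no max(2,.), no branching per line.
import Mathlib
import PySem

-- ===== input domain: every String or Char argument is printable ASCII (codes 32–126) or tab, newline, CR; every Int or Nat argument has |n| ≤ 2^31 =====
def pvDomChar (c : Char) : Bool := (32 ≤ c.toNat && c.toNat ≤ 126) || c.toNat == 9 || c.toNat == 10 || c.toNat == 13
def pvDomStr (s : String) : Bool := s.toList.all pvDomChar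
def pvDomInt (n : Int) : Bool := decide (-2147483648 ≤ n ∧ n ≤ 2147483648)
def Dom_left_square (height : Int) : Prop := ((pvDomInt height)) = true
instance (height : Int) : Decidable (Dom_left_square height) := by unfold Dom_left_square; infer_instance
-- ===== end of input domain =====

-- ===== PORT A =====
-- B builds the reversed bracket bottom-up with a length-driven while loop and reverses,
-- instead of A's indexed loop classifying each position; objective: alternative.
def LEFT_SQ_UPPER : String := "⎡"
def LEFT_SQ_EXT : String := "⎢"
def LEFT_SQ_LOWER : String := "⎣"

-- literal port of A: loop over range(height) classifying each index
def left_square (height : Int) : List String :=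
  let height := max 2 height
  (PySem.List.pyRange 0 height 1).foldl
    (fun lines i =>
      if i = 0 then lines ++ [LEFT_SQ_UPPER]
      else if i = height - 1 then lines ++ [LEFT_SQ_LOWER]
      else lines ++ [LEFT_SQ_EXT]) []

-- ===== PORT B =====
-- the while loop of B: grow rev with extension lines while len(rev)+1 < height
def lsGrow (height : Int) (rev : List String) : List String :=
  if (rev.length : Int) + 1 < height then lsGrow height (rev ++ [LEFT_SQ_EXT]) else rev
termination_by (height - rev.length).toNat
decreasing_by simp; omega

-- port of B: bottom-up reversed construction, then reverse ([::-1])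
def left_square_alt (height : Int) : List String :=
  (lsGrow height [LEFT_SQ_LOWER] ++ [LEFT_SQ_UPPER]).reverse

-- ===== PRECONDITION & SPEC =====
def Spec_left_square (height : Int) (out : List String) : Prop := out = left_square_alt height
instance (height : Int) (out : List String) : Decidable (Spec_left_square height out) := by unfold Spec_left_square; infer_instance

-- ===== CLAIM (what is proved, stated in full; the proofs are below) =====
def Claim_equal_left_square : Prop := ∀ (height : Int), Dom_left_square height → Spec_left_square height (left_square height)

-- ===== LEMMAS AND PROOFS =====

-- a foldl that appends one element per index is the map over the indices
theorem foldl_append_map (f : Int → String) (l : List Int) (init : List String) :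
    l.foldl (fun acc i => acc ++ [f i]) init = init ++ l.map f := by
  induction l generalizing init with
  | nil => simp
  | cons x xs ih => simp [List.foldl, ih]

-- the growth loop appends exactly (height - rev.length - 1)⁺ extension lines
theorem lsGrow_eq (height : Int) (rev : List String) :
    lsGrow height rev = rev ++ List.replicate (height - rev.length - 1).toNat LEFT_SQ_EXT := by
  by_cases h : (rev.length : Int) + 1 < height
  · rw [lsGrow, if_pos h, lsGrow_eq height (rev ++ [LEFT_SQ_EXT])]
    have : (height - (rev.length : Int) - 1).toNat
        = (height - ((rev ++ [LEFT_SQ_EXT]).length : Int) - 1).toNat + 1 := by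
      simp; omega
    rw [this, List.replicate_succ]
    simp
  · rw [lsGrow, if_neg h]
    have : (height - (rev.length : Int) - 1).toNat = 0 := by omega
    simp [this]
termination_by (height - rev.length).toNat
decreasing_by simp; omega

-- A's loop produces top ++ extensions ++ bottom in closed form
theorem left_square_closed (height : Int) :
    left_square height
      = [LEFT_SQ_UPPER] ++ List.replicate (height - 2).toNat LEFT_SQ_EXT ++ [LEFT_SQ_LOWER] := by
  unfold left_square
  dsimp only
  set h : Int := max 2 height with hh
  have h2 : 2 ≤ h := le_max_left _ _
  have step : (fun (lines : List String) (i : Int) =>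
      if i = 0 then lines ++ [LEFT_SQ_UPPER]
      else if i = h - 1 then lines ++ [LEFT_SQ_LOWER]
      else lines ++ [LEFT_SQ_EXT])
      = fun lines i => lines ++ [if i = 0 then LEFT_SQ_UPPER
          else if i = h - 1 then LEFT_SQ_LOWER else LEFT_SQ_EXT] := by
    funext lines i; split_ifs <;> rfl
  rw [step, foldl_append_map]
  have hsplit : PySem.List.pyRange 0 h 1
      = PySem.List.pyRange 0 (h-1) 1 ++ [h-1] := by
    have := PySem.List.pyRange_one_succ_right (a := 0) (b := h-1) (by omega)
    simpa using this
  rw [hsplit, PySem.List.pyRange_one_cons (by omega : (0:Int) < h - 1)]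
  have hmid : (PySem.List.pyRange 1 (h-1) 1).map
      (fun i => if i = 0 then LEFT_SQ_UPPER
        else if i = h - 1 then LEFT_SQ_LOWER else LEFT_SQ_EXT)
      = List.replicate (height - 2).toNat LEFT_SQ_EXT := by
    rw [PySem.List.pyRange_one, List.map_map]
    rw [List.eq_replicate_iff]
    refine ⟨by simp [hh]; omega, ?_⟩
    intro s hs
    simp only [List.mem_map, List.mem_range, Function.comp] at hs
    obtain ⟨k, hk, rfl⟩ := hs
    have h1 : (1 : Int) + k ≠ 0 := by omega
    have h2' : (1 : Int) + k ≠ h - 1 := by omega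
    simp [h1, h2']
  have hne : (h - 1 : Int) ≠ 0 := by omega
  have hne2 : ¬ ((0:Int) = h - 1) := by omega
  simp only [List.map_cons, List.map_append, List.map_nil, List.nil_append,
    if_neg hne2, if_true, zero_add, hmid]
  simp [hne]

-- ===== VERDICT (by name: the statement is the Claim_ definition above) =====
theorem left_square_spec : Claim_equal_left_square := by
  intro height _
  unfold Spec_left_square left_square_alt
  rw [left_square_closed, lsGrow_eq]
  have : (height - ([LEFT_SQ_LOWER].length : Int) - 1).toNat = (height - 2).toNat := by
    simp; omega
  rw [this]
  simp
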